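-- pv_equiv track=rewrite | github.com/bob8dod/Preparing_CodingTest | BaekJoon/ETC/P2800.py | solution
-- ===== SOURCE A (Python) =====
-- from collections import deque
-- from itertools import combinations
--
-- def solution(operation):
--     info = []
--     stk = deque([])
--     for idx, c in enumerate(operation):
--         if c == '(':
--             stk.append(idx)
--         elif c == ')':
--             info.append([stk.pop(), idx])
--
--     answer = set()
--     for step in range(1,len(info)+1):
--         for choiced in combinations(info,step):
--             temp = list(operation)
--             for first, end in choiced:
--                 temp[first] = temp[end] = ''
--             answer.add(''.join(temp))
--
--     return sorted(answer)
-- ===== SOURCE B (Python) =====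
-- def solution(operation):
--     pairs = []
--     stk = []
--     for idx, ch in enumerate(operation):
--         if ch == '(':
--             stk.append(idx)
--         elif ch == ')':
--             pairs.append((stk.pop(), idx))
--
--     answer = set()
--
--     def rec(rest, removed):
--         # rest: suffix of pairs still to decide; removed: positions blanked so far
--         if not rest:
--             if removed:
--                 answer.add(''.join(c for j, c in enumerate(operation)
--                                    if j not in removed))
--         else:
--             rec(rest[1:], removed)
--             a, b = rest[0]
--             rec(rest[1:], removed + [a, b])
--
--     rec(pairs, [])
--     return sorted(answer)
-- ===== Notes on version B (the rewrite author's own statement) =====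
-- stated objective: alternative
-- what changed: A's size-stratified itertools.combinations double loop with per-subset list mutation (temp[i]='') is replaced by an include/exclude recursion over the pair list that accumulates removed positions and builds each string by filtering enumerate; Pre_ excludes strings with an unmatched ')' on which both programs' stk.pop() raises IndexError.
import Mathlib
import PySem

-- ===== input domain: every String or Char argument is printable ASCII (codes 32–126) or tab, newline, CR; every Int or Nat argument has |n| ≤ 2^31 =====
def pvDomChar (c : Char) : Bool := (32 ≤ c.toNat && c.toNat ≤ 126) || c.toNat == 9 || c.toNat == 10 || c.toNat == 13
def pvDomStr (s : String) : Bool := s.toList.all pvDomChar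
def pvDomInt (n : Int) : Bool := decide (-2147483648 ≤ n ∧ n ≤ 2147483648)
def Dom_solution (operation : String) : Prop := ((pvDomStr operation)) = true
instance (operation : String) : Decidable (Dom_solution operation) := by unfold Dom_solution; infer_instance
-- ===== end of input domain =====

-- B replaces A's size-stratified itertools.combinations enumeration (with in-place list blanking)
-- by an include/exclude recursion over the pair list that collects removed positions and builds each
-- string by filtering; objective: alternative decomposition, same exact result.

-- ===== PORT A =====
-- stack is kept cons-side-first (deque append/pop at the same end); on ')' with an empty stack the
-- Python raises IndexError — excluded by Pre_solution, the port keeps the state unchanged there.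
def aStep (st : List (Int × Int) × List Int) (ic : Int × Char) : List (Int × Int) × List Int :=
  if ic.2 = '(' then (st.1, ic.1 :: st.2)
  else if ic.2 = ')' then
    match st.2 with
    | [] => st
    | t :: r => (st.1 ++ [(t, ic.1)], r)
  else st

-- temp[first] = temp[end] = '' on the char-list view (each cell a 1-char string, '' = [])
def aBlank (temp : List (List Char)) (pr : Int × Int) : List (List Char) :=
  PySem.List.pySetD (PySem.List.pySetD temp pr.1 []) pr.2 []

def solution (operation : String) : List String :=
  let info := ((PySem.List.enumerate operation.toList 0).foldl aStep ([], [])).1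
  let answer := (PySem.List.pyRange 1 ((info.length : Int) + 1) 1).foldl
    (fun ans step =>
      (PySem.List.combinations info step.toNat).foldl
        (fun ans choiced =>
          PySem.Set.add ans
            (String.ofList (choiced.foldl aBlank (operation.toList.map (fun c => [c]))).flatten))
        ans)
    PySem.Set.empty
  PySem.List.sorted answer (fun x => x) false

-- ===== PORT B =====
-- pair the brackets by a recursive scan carrying the index and the open stack
-- (')' with empty stack: Python raises, excluded by Pre_solution; port scans on)
def bPairs : List Char → Int → List Int → List (Int × Int)
  | [], _, _ => []
  | c :: cs, i, stk =>
    if c = '(' then bPairs cs (i + 1) (i :: stk)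
    else if c = ')' then
      match stk with
      | [] => bPairs cs (i + 1) []
      | t :: r => (t, i) :: bPairs cs (i + 1) r
    else bPairs cs (i + 1) stk

-- ''.join(c for j, c in enumerate(operation) if j not in removed)
def bBuild (s : List Char) (removed : List Int) : String :=
  String.ofList ((PySem.List.enumerate s 0).filterMap
    (fun jc => if jc.1 ∈ removed then none else some jc.2))

-- rec(rest, removed): keep-branch first, then remove-branch; leaf adds unless nothing was removed
def bRec (s : List Char) : List (Int × Int) → List Int → PySem.Set String → PySem.Set String
  | [], removed, ans => if removed = [] then ans else PySem.Set.add ans (bBuild s removed)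
  | p :: rest, removed, ans =>
      bRec s rest (removed ++ [p.1, p.2]) (bRec s rest removed ans)

def solution_alt (operation : String) : List String :=
  PySem.List.sorted (bRec operation.toList (bPairs operation.toList 0 []) [] PySem.Set.empty)
    (fun x => x) false

-- ===== PRECONDITION & SPEC =====
-- Pre_ excludes exactly the strings with a ')' that has no pending '(' (A's stk.pop() raises IndexError there)
def Pre_solution (operation : String) : Prop :=
  ∀ n ≤ operation.toList.length,
    (operation.toList.take n).count ')' ≤ (operation.toList.take n).count '('
instance (operation : String) : Decidable (Pre_solution operation) := by
  unfold Pre_solution; infer_instance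

def pvWitness_solution : String := "(a)"

def Spec_solution (operation : String) (out : List String) : Prop := out = solution_alt operation
instance (operation : String) (out : List String) : Decidable (Spec_solution operation out) := by
  unfold Spec_solution; infer_instance

-- ===== CLAIM (what is proved, stated in full; the proofs are below) =====
def Claim_equal_solution : Prop :=
  ∀ (operation : String), Dom_solution operation → Pre_solution operation →
    Spec_solution operation (solution operation)

-- ===== LEMMAS AND PROOFS =====

-- the positions removed by a chosen subset of pairs, in B's accumulation order
def flatPairs (ch : List (Int × Int)) : List Int := ch.flatMap (fun p => [p.1, p.2])

-- the common normal form of a blanked string: cell k kept iff its index is not removed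
def blankM : List Char → Int → List Int → List (List Char)
  | [], _, _ => []
  | c :: cs, i, rem => (if i ∈ rem then [] else [c]) :: blankM cs (i + 1) rem

-- 1: A's fold builds the same pair list as B's recursive scan
theorem foldA_eq_bPairs (cs : List Char) (i : Int) (stk : List Int) (info : List (Int × Int)) :
    ((PySem.List.enumerate cs i).foldl aStep (info, stk)).1 = info ++ bPairs cs i stk := by
  induction cs generalizing i stk info with
  | nil => simp [PySem.List.enumerate_nil, bPairs]
  | cons c cs ih =>
    rw [PySem.List.enumerate_cons, List.foldl_cons]
    by_cases h1 : c = '('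
    · simp [bPairs, aStep, h1, ih]
    · by_cases h2 : c = ')'
      · cases stk with
        | nil => simp [bPairs, aStep, h2, ih]
        | cons t r => simp [bPairs, aStep, h2, ih]
      · simp [bPairs, aStep, h1, h2, ih]

-- 2: every pair produced lies inside [0, i + |cs|)
theorem bPairs_range (cs : List Char) (i : Int) (stk : List Int)
    (hstk : ∀ j ∈ stk, 0 ≤ j ∧ j < i) (hi : 0 ≤ i) :
    ∀ pr ∈ bPairs cs i stk,
      (0 ≤ pr.1 ∧ pr.1 < i + cs.length) ∧ (0 ≤ pr.2 ∧ pr.2 < i + cs.length) := by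
  induction cs generalizing i stk with
  | nil => simp [bPairs]
  | cons c cs ih =>
    intro pr hpr
    simp only [bPairs] at hpr
    split_ifs at hpr with h1 h2
    · have := ih (i + 1) (i :: stk)
        (by intro j hj
            rcases List.mem_cons.mp hj with hj | hj
            · omega
            · have := hstk j hj; omega) (by omega) pr hpr
      simp only [List.length_cons] at *
      omega
    · cases stk with
      | nil =>
        have := ih (i + 1) [] (by simp) (by omega) pr hpr
        simp only [List.length_cons] at *
        omega
      | cons t r =>
        rcases List.mem_cons.mp hpr with hpr | hpr
        · subst hpr
          have := hstk t (by simp)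
          simp only [List.length_cons]
          constructor <;> constructor <;> omega
        · have := ih (i + 1) r (by intro j hj; have := hstk j (by simp [hj]); omega) (by omega) pr hpr
          simp only [List.length_cons] at *
          omega
    · have := ih (i + 1) stk (by intro j hj; have := hstk j hj; omega) (by omega) pr hpr
      simp only [List.length_cons] at *
      omega

theorem blankM_nil (s : List Char) (i : Int) : blankM s i [] = s.map (fun c => [c]) := by
  induction s generalizing i with
  | nil => simp [blankM]
  | cons c cs ih => simp [blankM, ih]

theorem blankM_append_lt (s : List Char) (i : Int) (rem : List Int) (j : Int) (h : j < i) :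
    blankM s i (rem ++ [j]) = blankM s i rem := by
  induction s generalizing i with
  | nil => simp [blankM]
  | cons c cs ih =>
    simp only [blankM, List.mem_append, List.mem_singleton, ih (i + 1) (by omega)]
    have : ¬ i = j := by omega
    simp [this]

theorem pySetD_blankM (s : List Char) (i : Int) (rem : List Int) (j : Int)
    (h0 : 0 ≤ i) (h1 : i ≤ j) (h2 : j < i + s.length) :
    PySem.List.pySetD (blankM s i rem) (j - i) [] = blankM s i (rem ++ [j]) := by
  induction s generalizing i with
  | nil => simp at h2; omega
  | cons c cs ih =>
    simp only [blankM]
    rw [PySem.List.pySetD_of_nonneg _ [] (by omega : (0:Int) ≤ j - i)]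
    by_cases hji : j = i
    · subst hji
      have h0' : (j - j).toNat = 0 := by omega
      rw [h0', List.set_cons_zero, blankM_append_lt cs (j + 1) rem j (by omega)]
      simp
    · have hk : (j - i).toNat = (j - (i + 1)).toNat + 1 := by omega
      rw [hk, List.set_cons_succ]
      have h2' : j < i + 1 + (cs.length : Int) := by
        push_cast [List.length_cons] at h2; omega
      have hih := ih (i + 1) (by omega) (by omega) h2'
      rw [PySem.List.pySetD_of_nonneg _ [] (by omega : (0:Int) ≤ j - (i + 1))] at hih
      rw [hih]
      have : ¬ i = j := by omega
      simp [this]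

theorem foldl_set_blankM (s : List Char) (rem rem0 : List Int)
    (h : ∀ j ∈ rem, 0 ≤ j ∧ j < (s.length : Int)) :
    rem.foldl (fun t j => PySem.List.pySetD t j []) (blankM s 0 rem0) = blankM s 0 (rem0 ++ rem) := by
  induction rem generalizing rem0 with
  | nil => simp
  | cons j rem' ih =>
    rw [List.foldl_cons]
    have hj := h j (by simp)
    have hset := pySetD_blankM s 0 rem0 j (by omega) (by omega) (by omega)
    simp only [sub_zero] at hset
    rw [hset, ih (rem0 ++ [j]) (fun j hj => h j (by simp [hj])), List.append_assoc,
      List.singleton_append]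

theorem foldl_aBlank_eq (ch : List (Int × Int)) (t : List (List Char)) :
    ch.foldl aBlank t = (flatPairs ch).foldl (fun t j => PySem.List.pySetD t j []) t := by
  induction ch generalizing t with
  | nil => simp [flatPairs]
  | cons p ch ih =>
    have hf : flatPairs (p :: ch) = p.1 :: p.2 :: flatPairs ch := by simp [flatPairs]
    rw [List.foldl_cons, ih, hf, List.foldl_cons, List.foldl_cons]
    rfl

theorem bBuild_eq_blankM (s : List Char) (i : Int) (rem : List Int) :
    (PySem.List.enumerate s i).filterMap
      (fun jc => if jc.1 ∈ rem then none else some jc.2) = (blankM s i rem).flatten := by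
  induction s generalizing i with
  | nil => simp [PySem.List.enumerate_nil, blankM]
  | cons c cs ih =>
    rw [PySem.List.enumerate_cons, List.filterMap_cons]
    by_cases hmem : i ∈ rem
    · simp [blankM, hmem, ih]
    · simp [blankM, hmem, ih]

-- A's per-subset string = B's per-subset string, for in-range pairs
theorem strA_eq_bBuild (s : List Char) (ch : List (Int × Int))
    (h : ∀ pr ∈ ch, (0 ≤ pr.1 ∧ pr.1 < (s.length : Int)) ∧ (0 ≤ pr.2 ∧ pr.2 < (s.length : Int))) :
    String.ofList (ch.foldl aBlank (s.map (fun c => [c]))).flatten = bBuild s (flatPairs ch) := by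
  unfold bBuild
  rw [bBuild_eq_blankM, foldl_aBlank_eq, ← blankM_nil s 0,
    foldl_set_blankM s (flatPairs ch) []
      (by intro j hj
          simp only [flatPairs, List.mem_flatMap] at hj
          obtain ⟨p, hp, hjp⟩ := hj
          have := h p hp
          rcases List.mem_cons.mp hjp with rfl | hjp
          · exact ⟨this.1.1, this.1.2⟩
          · rcases List.mem_cons.mp hjp with rfl | hjp
            · exact ⟨this.2.1, this.2.2⟩
            · simp at hjp),
    List.nil_append]

theorem flatPairs_eq_nil_iff (ch : List (Int × Int)) : flatPairs ch = [] ↔ ch = [] := by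
  cases ch <;> simp [flatPairs]

-- membership in A's answer set
theorem memA (s : List Char) (info : List (Int × Int)) (steps : List Int)
    (ans : PySem.Set String) (x : String) :
    x ∈ steps.foldl
        (fun ans step =>
          (PySem.List.combinations info step.toNat).foldl
            (fun ans choiced =>
              PySem.Set.add ans
                (String.ofList (choiced.foldl aBlank (s.map (fun c => [c]))).flatten)) ans) ans ↔
      x ∈ ans ∨ ∃ st ∈ steps, ∃ ch ∈ PySem.List.combinations info st.toNat,
        x = String.ofList (ch.foldl aBlank (s.map (fun c => [c]))).flatten := by
  induction steps generalizing ans with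
  | nil => simp
  | cons st steps ih =>
    rw [List.foldl_cons, ih, PySem.Set.mem_foldl_add]
    simp only [List.mem_cons]
    constructor
    · rintro ((hx | ⟨ch, hch, rfl⟩) | ⟨st', hst', hx⟩)
      · exact Or.inl hx
      · exact Or.inr ⟨st, Or.inl rfl, ch, hch, rfl⟩
      · exact Or.inr ⟨st', Or.inr hst', hx⟩
    · rintro (hx | ⟨st', hst' | hst', hx⟩)
      · exact Or.inl (Or.inl hx)
      · subst hst'; exact Or.inl (Or.inr hx)
      · exact Or.inr ⟨st', hst', hx⟩

-- membership in B's answer set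
theorem memB (s : List Char) (rest : List (Int × Int)) (removed : List Int)
    (ans : PySem.Set String) (x : String) :
    x ∈ bRec s rest removed ans ↔
      x ∈ ans ∨ ∃ ch, ch.Sublist rest ∧ removed ++ flatPairs ch ≠ [] ∧
        x = bBuild s (removed ++ flatPairs ch) := by
  induction rest generalizing removed ans with
  | nil =>
    by_cases hrem : removed = []
    · subst hrem
      simp [bRec, List.sublist_nil, flatPairs]
    · simp only [bRec, if_neg hrem, PySem.Set.mem_add, List.sublist_nil]
      constructor
      · rintro (hx | rfl)
        · exact Or.inl hx
        · exact Or.inr ⟨[], rfl, by simp [flatPairs, hrem], by simp [flatPairs]⟩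
      · rintro (hx | ⟨ch, rfl, hne, rfl⟩)
        · exact Or.inl hx
        · simp [flatPairs]
    | cons p rest ih =>
      simp only [bRec]
      rw [ih, ih]
      constructor
      · rintro ((hx | ⟨ch, hch, hne, rfl⟩) | ⟨ch, hch, hne, rfl⟩)
        · exact Or.inl hx
        · exact Or.inr ⟨ch, List.sublist_cons_iff.mpr (Or.inl hch), hne, rfl⟩
        · refine Or.inr ⟨p :: ch, List.sublist_cons_iff.mpr (Or.inr ⟨ch, rfl, hch⟩), ?_, ?_⟩
          · simp [flatPairs]
          · simp [flatPairs]
      · rintro (hx | ⟨ch, hch, hne, rfl⟩)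
        · exact Or.inl (Or.inl hx)
        · rcases List.sublist_cons_iff.mp hch with hch | ⟨ch', rfl, hch'⟩
          · exact Or.inl (Or.inr ⟨ch, hch, hne, rfl⟩)
          · refine Or.inr ⟨ch', hch', ?_, ?_⟩
            · simp [flatPairs]
            · simp [flatPairs]

theorem nodup_foldl_add {α β : Type} [BEq α] [LawfulBEq α] (l : List β) (f : β → α)
    (s : PySem.Set α) (h : s.Nodup) :
    (l.foldl (fun a b => PySem.Set.add a (f b)) s).Nodup := by
  induction l generalizing s with
  | nil => exact h
  | cons b l ih => exact ih (PySem.Set.add s (f b)) (PySem.Set.nodup_add s (f b) h)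

theorem nodup_bRec (s : List Char) (rest : List (Int × Int)) (removed : List Int)
    (ans : PySem.Set String) (h : ans.Nodup) : (bRec s rest removed ans).Nodup := by
  induction rest generalizing removed ans with
  | nil =>
    simp only [bRec]
    split
    · exact h
    · exact PySem.Set.nodup_add _ _ h
  | cons p rest ih => exact ih _ _ (ih _ _ h)

theorem nodup_foldl_steps (s : List Char) (info : List (Int × Int)) (steps : List Int)
    (ans : PySem.Set String) (h : ans.Nodup) :
    (steps.foldl
      (fun ans step =>
        (PySem.List.combinations info step.toNat).foldl
          (fun ans choiced =>
            PySem.Set.add ans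
              (String.ofList (choiced.foldl aBlank (s.map (fun c => [c]))).flatten)) ans)
      ans).Nodup := by
  induction steps generalizing ans with
  | nil => exact h
  | cons st steps ih => exact ih _ (nodup_foldl_add _ _ _ h)

theorem mem_answerA_iff_mem_answerB (s : List Char) (x : String) :
    x ∈ (PySem.List.pyRange 1 (((bPairs s 0 []).length : Int) + 1) 1).foldl
        (fun ans step =>
          (PySem.List.combinations (bPairs s 0 []) step.toNat).foldl
            (fun ans choiced =>
              PySem.Set.add ans
                (String.ofList (choiced.foldl aBlank (s.map (fun c => [c]))).flatten)) ans)
        PySem.Set.empty ↔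
      x ∈ bRec s (bPairs s 0 []) [] PySem.Set.empty := by
  have hrange : ∀ pr ∈ bPairs s 0 [],
      (0 ≤ pr.1 ∧ pr.1 < (s.length : Int)) ∧ (0 ≤ pr.2 ∧ pr.2 < (s.length : Int)) := by
    intro pr hpr
    simpa using bPairs_range s 0 [] (by simp) (le_refl 0) pr hpr
  rw [memA, memB]
  constructor
  · rintro (hx | ⟨st, hst, ch, hch, rfl⟩)
    · exact Or.inl hx
    · obtain ⟨hsub, hlen⟩ := (PySem.List.mem_combinations_iff _ _ _).mp hch
      have hst' := (PySem.List.mem_pyRange_one).mp hst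
      refine Or.inr ⟨ch, hsub, ?_, ?_⟩
      · rw [List.nil_append, Ne, flatPairs_eq_nil_iff]
        intro hnil
        subst hnil
        simp at hlen
        omega
      · rw [List.nil_append]
        exact strA_eq_bBuild s ch (fun pr hpr => hrange pr (hsub.subset hpr))
  · rintro (hx | ⟨ch, hsub, hne, rfl⟩)
    · exact Or.inl hx
    · rw [List.nil_append, Ne, flatPairs_eq_nil_iff] at hne
      refine Or.inr ⟨(ch.length : Int), ?_, ch, ?_, ?_⟩
      · rw [PySem.List.mem_pyRange_one]
        have h1 : 1 ≤ ch.length := by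
          cases ch with
          | nil => exact absurd rfl hne
          | cons a l => simp
        have h2 := hsub.length_le
        omega
      · rw [PySem.List.mem_combinations_iff]
        exact ⟨hsub, by simp⟩
      · rw [List.nil_append]
        exact (strA_eq_bBuild s ch (fun pr hpr => hrange pr (hsub.subset hpr))).symm

-- ===== VERDICT (by name: the statement is the Claim_ definition above) =====
theorem solution_spec : Claim_equal_solution := by
  intro op hdom hpre
  show solution op = solution_alt op
  simp only [solution, solution_alt]
  rw [show ((PySem.List.enumerate op.toList 0).foldl aStep ([], [])).1 = bPairs op.toList 0 []
    from by simpa using foldA_eq_bPairs op.toList 0 [] []]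
  refine PySem.List.sorted_eq_sorted_of_perm _ _ _ (fun a b h => h) ?_
  refine (List.perm_ext_iff_of_nodup ?_ ?_).mpr ?_
  · exact nodup_foldl_steps _ _ _ _ (by simp [PySem.Set.empty])
  · exact nodup_bRec _ _ _ _ (by simp [PySem.Set.empty])
  · intro x
    exact mem_answerA_iff_mem_answerB op.toList x
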